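-- pv_equiv track=rewrite | github.com/saydokeita/othello | othello_ver1_kihu.py | check_gameover_or_continue
-- ===== SOURCE A (Python) =====
-- def check_gameover_or_continue(board):
--     'boardの盤面の駒、空白の数を数え、勝敗を調べ,先手勝利で１、後手勝利で２、引き分けで３、続行で４を返す'
--     board2 = []
--     for i in board:
--         for j in i:
--             board2.append(j)
--     ocount = board2.count(0)
--     fcount = board2.count(1)
--     scount = board2.count(-1)
--     if(ocount == 0):
--         if (fcount > scount):
--             return 1
--         if (fcount < scount):
--             return 2
--         if (fcount == scount):
--             return 3
--     else:
--         return 4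
-- ===== SOURCE B (Python) =====
-- def check_gameover_or_continue(board):
--     'boardの盤面の駒、空白の数を数え、勝敗を調べ,先手勝利で１、後手勝利で２、引き分けで３、続行で４を返す'
--     diff = 0
--     has_empty = False
--     for row in board:
--         for cell in row:
--             if cell == 0:
--                 has_empty = True
--             elif cell == 1:
--                 diff += 1
--             elif cell == -1:
--                 diff -= 1
--     if has_empty:
--         return 4
--     if diff > 0:
--         return 1
--     if diff < 0:
--         return 2
--     return 3
-- ===== Notes on version B (the rewrite author's own statement) =====
-- stated objective: simpler
-- what changed: Single pass over the board maintaining a signed black-minus-white difference and an empty-cell flag, instead of flattening into a new intermediate list and scanning it three more times with .count().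
import Mathlib
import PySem

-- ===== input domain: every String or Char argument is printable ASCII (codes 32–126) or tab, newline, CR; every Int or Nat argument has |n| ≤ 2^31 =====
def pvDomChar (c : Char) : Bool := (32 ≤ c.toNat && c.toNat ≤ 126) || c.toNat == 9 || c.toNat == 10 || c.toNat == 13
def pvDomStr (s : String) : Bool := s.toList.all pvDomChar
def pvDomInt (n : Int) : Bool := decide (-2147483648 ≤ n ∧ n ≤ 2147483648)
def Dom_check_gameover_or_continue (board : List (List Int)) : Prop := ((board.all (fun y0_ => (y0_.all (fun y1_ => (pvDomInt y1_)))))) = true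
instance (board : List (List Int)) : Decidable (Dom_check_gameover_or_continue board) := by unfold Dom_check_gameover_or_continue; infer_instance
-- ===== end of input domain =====

-- B replaces A's flatten-then-three-count()-scans by one pass keeping a signed difference and an empty flag (simpler: no intermediate list).

-- ===== PORT A =====
-- literal port: build board2 by appending, then three .count scans, then branch
def check_gameover_or_continue (board : List (List Int)) : Int :=
  let board2 := board.foldl (fun acc i => i.foldl (fun a j => a ++ [j]) acc) ([] : List Int)
  let ocount := PySem.List.count board2 0
  let fcount := PySem.List.count board2 1
  let scount := PySem.List.count board2 (-1)
  if ocount = 0 then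
    if fcount > scount then 1
    else if fcount < scount then 2
    else 3
  else 4

-- ===== PORT B =====
def cgocStep (st : Int × Bool) (cell : Int) : Int × Bool :=
  if cell = 0 then (st.1, true)
  else if cell = 1 then (st.1 + 1, st.2)
  else if cell = -1 then (st.1 - 1, st.2)
  else st

def check_gameover_or_continue_alt (board : List (List Int)) : Int :=
  let s := board.foldl (fun st row => row.foldl cgocStep st) ((0 : Int), false)
  if s.2 then 4
  else if s.1 > 0 then 1
  else if s.1 < 0 then 2
  else 3

-- ===== PRECONDITION & SPEC =====
def Spec_check_gameover_or_continue (board : List (List Int)) (out : Int) : Prop := out = check_gameover_or_continue_alt board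
instance (board : List (List Int)) (out : Int) : Decidable (Spec_check_gameover_or_continue board out) := by unfold Spec_check_gameover_or_continue; infer_instance

-- ===== CLAIM (what is proved, stated in full; the proofs are below) =====
def Claim_equal_check_gameover_or_continue : Prop := ∀ (board : List (List Int)), Dom_check_gameover_or_continue board → Spec_check_gameover_or_continue board (check_gameover_or_continue board)

-- ===== LEMMAS AND PROOFS =====

theorem cgoc_append_fold (l : List Int) (acc : List Int) :
    l.foldl (fun a j => a ++ [j]) acc = acc ++ l := by
  induction l generalizing acc with
  | nil => simp
  | cons h t ih => simp [List.foldl, ih]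

theorem cgoc_flatten (board : List (List Int)) :
    board.foldl (fun acc i => i.foldl (fun a j => a ++ [j]) acc) ([] : List Int)
      = board.flatten := by
  suffices h : ∀ acc, board.foldl (fun acc i => i.foldl (fun a j => a ++ [j]) acc) acc
      = acc ++ board.flatten by simpa using h []
  induction board with
  | nil => simp
  | cons r t ih =>
    intro acc
    rw [List.foldl_cons, cgoc_append_fold, ih]
    simp

theorem cgoc_step_fold (l : List Int) (st : Int × Bool) :
    l.foldl cgocStep st
      = (st.1 + (l.count 1 : Int) - (l.count (-1) : Int), st.2 || decide ((0:Int) ∈ l)) := by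
  induction l generalizing st with
  | nil => simp
  | cons h t ih =>
    by_cases h0 : h = 0
    · subst h0
      simp [List.foldl, cgocStep, ih]
    · by_cases h1 : h = 1
      · subst h1
        simp [List.foldl, cgocStep, ih]
        omega
      · by_cases hm : h = -1
        · subst hm
          simp [List.foldl, cgocStep, ih]
          omega
        · simp [List.foldl, cgocStep, h0, h1, hm, ih, Ne.symm h0]

theorem cgoc_nested_fold (board : List (List Int)) :
    board.foldl (fun st row => row.foldl cgocStep st) ((0 : Int), false)
      = board.flatten.foldl cgocStep ((0 : Int), false) := by
  simp [List.foldl_flatten]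

-- ===== VERDICT (by name: the statement is the Claim_ definition above) =====
theorem check_gameover_or_continue_spec : Claim_equal_check_gameover_or_continue := by
  intro board _
  unfold Spec_check_gameover_or_continue check_gameover_or_continue check_gameover_or_continue_alt
  rw [cgoc_flatten, cgoc_nested_fold, cgoc_step_fold]
  set l := board.flatten with hl
  simp only [PySem.List.count_eq]
  have hcount : (0:Int) ∈ l ↔ 0 < l.count 0 := (List.count_pos_iff).symm
  by_cases hz : (0:Int) ∈ l
  · have : l.count 0 ≠ 0 := by have := hcount.mp hz; omega
    simp [hz, this]
  · have : l.count 0 = 0 := by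
      by_contra h; exact hz (hcount.mpr (Nat.pos_of_ne_zero h))
    simp only [hz, decide_false, Bool.or_false]
    simp only [this]
    split_ifs with a b c d <;> try rfl
    all_goals (first | omega | exact False.elim (by assumption))
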